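-- pv_equiv track=rewrite | github.com/Danielsuhang/UpdatedTextSimplificationApp | flask-server/application.py | createChapterNavigation
-- ===== SOURCE A (Python) =====
-- def createChapterNavigation(paragraphs):
--     chapters = []
--     chapterDict = {}
--     for idx, para in enumerate(paragraphs):
--         if "Chapter" in para:
--             chapters.append(para)
--         if idx > 100:
--             break
--     for chapter in chapters:
--         chapterDict[chapter] = next(i for i in reversed(range(len(paragraphs))) if paragraphs[i] == chapter)
--     return chapterDict
-- ===== SOURCE B (Python) =====
-- def createChapterNavigation(paragraphs):
--     # Pass 1: distinct candidate chapter texts (first-occurrence order) among the first 102 paragraphs.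
--     candidates = []
--     seen = set()
--     for para in paragraphs[:102]:
--         if "Chapter" in para and para not in seen:
--             seen.add(para)
--             candidates.append(para)
--     # Pass 2: one backward scan records each candidate's last occurrence index; stop when all are found.
--     last = {}
--     remaining = set(candidates)
--     for i in reversed(range(len(paragraphs))):
--         if not remaining:
--             break
--         p = paragraphs[i]
--         if p in remaining:
--             last[p] = i
--             remaining.remove(p)
--     return {c: last[c] for c in candidates}
-- ===== Notes on version B (the rewrite author's own statement) =====
-- stated objective: alternative
-- what changed: A rescans the whole paragraph list from the back once per collected chapter; B makes one pass over paragraphs[:102] collecting the distinct candidates and then a single short-circuiting backward scan with a shrinking set that records each candidate's last occurrence index.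
import Mathlib
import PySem

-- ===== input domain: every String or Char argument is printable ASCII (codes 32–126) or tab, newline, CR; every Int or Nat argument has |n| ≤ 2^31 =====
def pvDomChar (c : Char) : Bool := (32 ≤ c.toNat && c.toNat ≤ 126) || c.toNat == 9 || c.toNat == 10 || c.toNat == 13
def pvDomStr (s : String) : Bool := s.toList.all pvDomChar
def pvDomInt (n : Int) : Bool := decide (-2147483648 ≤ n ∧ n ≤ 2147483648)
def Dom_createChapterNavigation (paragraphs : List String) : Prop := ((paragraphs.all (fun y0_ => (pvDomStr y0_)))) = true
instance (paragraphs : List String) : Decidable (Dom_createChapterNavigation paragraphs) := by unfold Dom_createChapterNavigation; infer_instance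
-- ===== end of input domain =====

-- B replaces A's per-chapter reverse rescan of the whole list by ONE backward scan with a shrinking
-- set of still-unlocated chapters (objective: a single pass instead of nested passes).

-- ===== PORT A =====
-- A's first loop: enumerate(paragraphs); 'if "Chapter" in para: chapters.append(para)'; 'if idx > 100: break'
def pvChaptersA : List String → Nat → List String
  | [], _ => []
  | para :: rest, idx =>
    (if PySem.Str.isIn "Chapter" para then [para] else []) ++
      (if idx > 100 then [] else pvChaptersA rest (idx + 1))

-- next(i for i in reversed(range(len(paragraphs))) if paragraphs[i] == chapter).
-- Every i drawn from range(len(paragraphs)) is in bounds, so paragraphs[i] is List.getD i "" exactly;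
-- the none branch is Python's StopIteration, unreachable because every chapter occurs in paragraphs.
def pvLastIdxA (paragraphs : List String) (chapter : String) : Int :=
  match (List.range paragraphs.length).reverse.find? (fun i => paragraphs.getD i "" == chapter) with
  | some i => (i : Int)
  | none => 0

def createChapterNavigation (paragraphs : List String) : List (String × Int) :=
  ((pvChaptersA paragraphs 0).foldl
    (fun d chapter => d.insert chapter (pvLastIdxA paragraphs chapter)) PySem.Dict.empty).items

-- ===== PORT B =====
-- B's backward scan: 'for i in reversed(range(len(paragraphs)))' with 'if not remaining: break';
-- every i is in bounds so paragraphs[i] is List.getD i ""; 'remaining.remove(p)' runs under the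
-- membership guard, where remove = discard.
def pvScanB (paragraphs : List String) : List Nat → PySem.Set String → PySem.Dict String Int → PySem.Dict String Int
  | [], _, last => last
  | i :: rest, remaining, last =>
    if remaining.isEmpty then last
    else
      let p := paragraphs.getD i ""
      if PySem.Set.contains remaining p then
        pvScanB paragraphs rest (remaining.discard p) (last.insert p (i : Int))
      else pvScanB paragraphs rest remaining last

-- B's pass 1: distinct candidate chapter texts, first-occurrence order, from paragraphs[:102]
-- (the fold state is (seen, candidates))
def pvCandsB (paragraphs : List String) : List String :=
  ((PySem.List.slice paragraphs none (some 102)).foldl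
    (fun (st : PySem.Set String × List String) para =>
      if PySem.Str.isIn "Chapter" para && !(PySem.Set.contains st.1 para) then
        (st.1.add para, st.2 ++ [para])
      else st) (PySem.Set.empty, [])).2

-- B's pass 2: 'last', the dict built by the single backward scan
def pvLastB (paragraphs : List String) : PySem.Dict String Int :=
  pvScanB paragraphs (List.range paragraphs.length).reverse
    (PySem.Set.ofList (pvCandsB paragraphs)) PySem.Dict.empty

-- last[c]: the none branch is Python's KeyError, unreachable since every candidate occurs in paragraphs
def createChapterNavigation_alt (paragraphs : List String) : List (String × Int) :=
  ((pvCandsB paragraphs).foldl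
    (fun d c => d.insert c (((pvLastB paragraphs).get? c).getD 0)) PySem.Dict.empty).items

-- ===== PRECONDITION & SPEC =====
def Spec_createChapterNavigation (paragraphs : List String) (out : List (String × Int)) : Prop := out = createChapterNavigation_alt paragraphs
instance (paragraphs : List String) (out : List (String × Int)) : Decidable (Spec_createChapterNavigation paragraphs out) := by unfold Spec_createChapterNavigation; infer_instance

-- ===== CLAIM (what is proved, stated in full; the proofs are below) =====
def Claim_equal_createChapterNavigation : Prop := ∀ (paragraphs : List String), Dom_createChapterNavigation paragraphs → Spec_createChapterNavigation paragraphs (createChapterNavigation paragraphs)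

-- ===== LEMMAS AND PROOFS =====

-- A's break-at-102 loop is the filtered 102-prefix
theorem pvChaptersA_eq (l : List String) (idx : Nat) (h : idx ≤ 101) :
    pvChaptersA l idx = (l.take (102 - idx)).filter (fun para => PySem.Str.isIn "Chapter" para) := by
  induction l generalizing idx with
  | nil => simp [pvChaptersA]
  | cons para rest ih =>
    by_cases h101 : idx > 100
    · have h1 : idx = 101 := by omega
      subst h1
      simp only [pvChaptersA, List.take_succ_cons, List.take_zero, List.filter_cons,
        List.filter_nil, gt_iff_lt, if_pos (by omega : 100 < 101)]
      split <;> simp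
    · have h2 : 102 - idx = (102 - (idx + 1)) + 1 := by omega
      rw [h2]
      simp only [pvChaptersA, if_neg h101, ih (idx + 1) (by omega), List.take_succ_cons,
        List.filter_cons]
      split <;> simp

-- B's first loop keeps its set and list identical; both are the filtered input folded through Set.add
theorem pvCandB_eq (l : List String) (c : PySem.Set String) :
    l.foldl (fun (st : PySem.Set String × List String) para =>
      if PySem.Str.isIn "Chapter" para && !(PySem.Set.contains st.1 para) then
        (st.1.add para, st.2 ++ [para])
      else st) (c, c)
    = ((l.filter (fun para => PySem.Str.isIn "Chapter" para)).foldl PySem.Set.add c,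
       (l.filter (fun para => PySem.Str.isIn "Chapter" para)).foldl PySem.Set.add c) := by
  induction l generalizing c with
  | nil => simp
  | cons para rest ih =>
    rw [List.foldl_cons, List.filter_cons]
    by_cases hP : PySem.Str.isIn "Chapter" para = true
    · by_cases hm : para ∈ c
      · have hc : PySem.Set.contains c para = true := (PySem.Set.contains_iff c para).mpr hm
        have hadd : PySem.Set.add c para = c := PySem.Set.add_of_mem hm
        simp only [hP, hc, Bool.not_true, Bool.and_false, Bool.false_eq_true,
          not_false_eq_true, if_neg, if_pos, List.foldl_cons, hadd]
        exact ih c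
      · have hc : PySem.Set.contains c para = false := by
          cases h : PySem.Set.contains c para
          · rfl
          · exact absurd ((PySem.Set.contains_iff c para).mp h) hm
        have hadd : PySem.Set.add c para = c ++ [para] := PySem.Set.add_of_not_mem hm
        simp only [hP, hc, Bool.not_false, Bool.and_true, if_pos, List.foldl_cons, hadd]
        exact ih (c ++ [para])
    · have hP' : PySem.Str.isIn "Chapter" para = false := by
        cases h : PySem.Str.isIn "Chapter" para
        · rfl
        · exact absurd h hP
      simp only [hP', Bool.false_and, Bool.false_eq_true, not_false_eq_true, if_neg]
      exact ih c

-- inserting a key with the value it already holds is a no-op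
theorem pvDict_insert_id (d : PySem.Dict String Int) (k : String) (w : Int)
    (hnd : d.keys.Nodup) (hg : d.get? k = some w) : d.insert k w = d := by
  have hc : d.contains k = true := by
    rw [PySem.Dict.contains_eq_isSome_get?, hg]; rfl
  apply PySem.Dict.ext
  rw [PySem.Dict.items_insert_of_contains _ _ hc]
  have hpt : ∀ p ∈ d.items, (if (p.1 == k) = true then (k, w) else p) = id p := by
    intro p hp
    obtain ⟨p1, p2⟩ := p
    by_cases hk : p1 = k
    · subst hk
      have hsome : d.get? p1 = some p2 := PySem.Dict.get?_of_mem_items d hp hnd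
      rw [hg] at hsome
      have hw : w = p2 := by injection hsome
      simp [hw]
    · simp [hk]
  rw [List.map_congr_left hpt, List.map_id]

-- a fold of keyed inserts (values a function of the key) appends the new keys, deduplicated in order
theorem pvFoldInsert_items (v : String → Int) (l : List String) (d : PySem.Dict String Int)
    (hnd : d.keys.Nodup) (hv : ∀ k w, d.get? k = some w → w = v k) :
    (l.foldl (fun d c => d.insert c (v c)) d).items
      = d.items ++ ((PySem.Set.ofList l).filter (fun c => !d.contains c)).map (fun c => (c, v c)) := by
  induction l generalizing d with
  | nil => simp [PySem.Set.ofList]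
  | cons x xs ih =>
    rw [List.foldl_cons, PySem.Set.ofList_cons]
    by_cases hc : d.contains x = true
    · -- x already present with value v x: the insert is a no-op
      have hg : d.get? x = some (v x) := by
        rw [PySem.Dict.contains_eq_isSome_get?] at hc
        obtain ⟨w, hw⟩ := Option.isSome_iff_exists.mp hc
        rw [hw, hv x w hw]
      rw [pvDict_insert_id d x (v x) hnd hg, ih d hnd hv]
      congr 1
      rw [List.filter_cons]
      simp only [hc, Bool.not_true, Bool.false_eq_true, if_false]
      rw [PySem.Set.discard, List.filter_filter]
      apply congrArg (List.map _)
      apply List.filter_congr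
      intro y _
      by_cases hyx : y = x
      · subst hyx; simp [hc]
      · simp [hyx]
    · have hc' : d.contains x = false := by simpa using hc
      have hnd' : (d.insert x (v x)).keys.Nodup := PySem.Dict.nodup_keys_insert d x (v x) hnd
      have hv' : ∀ k w, (d.insert x (v x)).get? k = some w → w = v k := by
        intro k w hg
        by_cases hk : k = x
        · subst hk
          rw [PySem.Dict.get?_insert_self] at hg
          injection hg.symm
        · rw [PySem.Dict.get?_insert_of_ne _ _ hk] at hg
          exact hv k w hg
      rw [ih _ hnd' hv', PySem.Dict.items_insert_of_not_contains _ _ hc']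
      rw [List.filter_cons]
      simp only [hc', Bool.not_false, if_true]
      simp only [List.map_cons, List.append_assoc, List.singleton_append]
      congr 2
      rw [PySem.Set.discard, List.filter_filter]
      apply congrArg (List.map _)
      apply List.filter_congr
      intro y _
      rw [PySem.Dict.contains_insert]
      cases hyx : y == x with
      | true => simp at hyx; subst hyx; simp
      | false => simp

-- characterisation of B's backward scan over reversed(range(j))
theorem pvScanB_get? (paragraphs : List String) (j : Nat) (R : PySem.Set String)
    (last : PySem.Dict String Int) (c : String) :
    (pvScanB paragraphs ((List.range j).reverse) R last).get? c
      = match (if c ∈ R then (List.range j).reverse.find? (fun i => paragraphs.getD i "" == c) else none) with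
        | some i => some (i : Int)
        | none => last.get? c := by
  induction j generalizing R last with
  | zero =>
    simp [pvScanB]
  | succ j ih =>
    have hrev : (List.range (j + 1)).reverse = j :: (List.range j).reverse := by
      rw [List.range_succ, List.reverse_append]; rfl
    rw [hrev]
    by_cases hemp : (R : List String).isEmpty = true
    · have hR : R = [] := List.isEmpty_iff.mp hemp
      subst hR
      simp [pvScanB]
    · simp only [pvScanB, if_neg hemp]
      by_cases hcp : c = paragraphs.getD j ""
      · -- the scanned paragraph is c itself
        by_cases hcR : c ∈ R
        · have hcont : PySem.Set.contains R (paragraphs.getD j "") = true := by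
            rw [PySem.Set.contains_iff]; rw [← hcp]; exact hcR
          rw [if_pos hcont, ih]
          have hnotin : c ∉ R.discard (paragraphs.getD j "") := by
            rw [PySem.Set.mem_discard]
            exact fun h => h.2 hcp
          rw [if_neg hnotin]
          have hfind : (List.find? (fun i => paragraphs.getD i "" == c) (j :: (List.range j).reverse)) = some j := by
            rw [List.find?_cons_of_pos]
            simp [hcp]
          rw [if_pos hcR, hfind]
          simp only
          rw [hcp, PySem.Dict.get?_insert_self]
        · rw [if_neg hcR]
          by_cases hcont : PySem.Set.contains R (paragraphs.getD j "") = true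
          · exact absurd (hcp ▸ (PySem.Set.contains_iff R _).mp hcont) hcR
          · rw [if_neg hcont, ih, if_neg hcR]
      · -- the scanned paragraph differs from c: the head of find? fails
        have hbeq : (paragraphs.getD j "" == c) = false := by
          rw [beq_eq_false_iff_ne]
          exact fun h => hcp h.symm
        have hfind : List.find? (fun i => paragraphs.getD i "" == c) (j :: (List.range j).reverse)
            = List.find? (fun i => paragraphs.getD i "" == c) ((List.range j).reverse) := by
          exact List.find?_cons_of_neg (by rw [hbeq]; simp)
        rw [hfind]
        by_cases hcont : PySem.Set.contains R (paragraphs.getD j "") = true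
        · rw [if_pos hcont, ih]
          have hmem : c ∈ R.discard (paragraphs.getD j "") ↔ c ∈ R := by
            rw [PySem.Set.mem_discard]
            exact ⟨fun h => h.1, fun h => ⟨h, hcp⟩⟩
          by_cases hcR : c ∈ R
          · rw [if_pos (hmem.mpr hcR), if_pos hcR]
            cases hf : List.find? (fun i => paragraphs.getD i "" == c) ((List.range j).reverse) with
            | none =>
              simp only
              rw [PySem.Dict.get?_insert_of_ne _ _ hcp]
            | some i => simp
          · rw [if_neg (by rw [hmem]; exact hcR), if_neg hcR]
            simp only
            rw [PySem.Dict.get?_insert_of_ne _ _ hcp]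
        · rw [if_neg hcont, ih]

theorem createChapterNavigation_eq (paragraphs : List String) :
    createChapterNavigation paragraphs = createChapterNavigation_alt paragraphs := by
  unfold createChapterNavigation createChapterNavigation_alt pvLastB pvCandsB
  have hslice : PySem.List.slice paragraphs none (some 102) = paragraphs.take 102 := by
    have h := PySem.List.slice_to paragraphs (b := 102) (by omega)
    simpa using h
  have hinit : ((PySem.Set.empty : PySem.Set String), ([] : List String))
      = ((PySem.Set.empty : PySem.Set String), (PySem.Set.empty : List String)) := rfl
  rw [hslice, hinit, pvCandB_eq]
  simp only
  have hofl : List.foldl PySem.Set.add (PySem.Set.empty : PySem.Set String)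
      ((paragraphs.take 102).filter (fun para => PySem.Str.isIn "Chapter" para))
      = PySem.Set.ofList ((paragraphs.take 102).filter (fun para => PySem.Str.isIn "Chapter" para)) :=
    (PySem.Set.ofList_eq_foldl _).symm
  rw [hofl]
  set F : List String := (paragraphs.take 102).filter (fun para => PySem.Str.isIn "Chapter" para) with hF
  have hA : pvChaptersA paragraphs 0 = F := by
    rw [pvChaptersA_eq paragraphs 0 (by omega)]
  rw [hA]
  have hnodup : (PySem.Set.ofList F).Nodup := PySem.Set.nodup_ofList F
  have hAitems :
      ((F.foldl (fun d chapter => d.insert chapter (pvLastIdxA paragraphs chapter)) PySem.Dict.empty).items)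
        = (PySem.Set.ofList F).map (fun c => (c, pvLastIdxA paragraphs c)) := by
    rw [pvFoldInsert_items (pvLastIdxA paragraphs) F PySem.Dict.empty (by simp [PySem.Dict.keys_empty])
      (by intro k w h; rw [PySem.Dict.get?_empty] at h; exact absurd h (by simp))]
    simp [PySem.Dict.empty]
  have hBitems :
      (((PySem.Set.ofList F).foldl (fun d c => d.insert c
          (((pvScanB paragraphs (List.range paragraphs.length).reverse
              (PySem.Set.ofList (PySem.Set.ofList F)) PySem.Dict.empty).get? c).getD 0)) PySem.Dict.empty).items)
        = (PySem.Set.ofList F).map (fun c => (c,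
            ((pvScanB paragraphs (List.range paragraphs.length).reverse
              (PySem.Set.ofList (PySem.Set.ofList F)) PySem.Dict.empty).get? c).getD 0)) := by
    have h := PySem.Dict.items_foldl_insert_fresh (PySem.Set.ofList F) (fun c => c)
      (fun c => ((pvScanB paragraphs (List.range paragraphs.length).reverse
              (PySem.Set.ofList (PySem.Set.ofList F)) PySem.Dict.empty).get? c).getD 0)
      PySem.Dict.empty (by intro a _; simp [PySem.Dict.contains_empty]) (by rw [List.map_id_fun']; exact hnodup)
    simpa using h
  rw [hAitems, hBitems]
  -- pointwise: both values are the index found by the same reverse search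
  apply List.map_congr_left
  intro c hc
  have hcF : c ∈ F := (PySem.Set.mem_ofList F c).mp hc
  have hcPara : c ∈ paragraphs := List.take_subset 102 paragraphs (List.mem_of_mem_filter hcF)
  obtain ⟨i, hi, hgi⟩ := List.mem_iff_getElem.mp hcPara
  have hsome : ((List.range paragraphs.length).reverse.find?
      (fun i => paragraphs.getD i "" == c)).isSome = true := by
    rw [List.find?_isSome]
    refine ⟨i, by simp [hi], ?_⟩
    simp [List.getD_eq_getElem?_getD, List.getElem?_eq_getElem hi, hgi]
  obtain ⟨i0, hi0⟩ := Option.isSome_iff_exists.mp hsome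
  have hR0 : PySem.Set.ofList (PySem.Set.ofList F) = PySem.Set.ofList F :=
    PySem.Set.ofList_eq_self_of_nodup _ hnodup
  rw [pvScanB_get?, hR0, if_pos hc, hi0]
  simp only [Option.getD_some]
  unfold pvLastIdxA
  rw [hi0]

-- ===== VERDICT (by name: the statement is the Claim_ definition above) =====
theorem createChapterNavigation_spec : Claim_equal_createChapterNavigation := by
  intro paragraphs _
  unfold Spec_createChapterNavigation
  exact createChapterNavigation_eq paragraphs
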